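-- pv_equiv track=rewrite | github.com/michaelwjones/Tide-Monitor | backend/firebase-functions/tidal-analysis/functions/transformer/v1/data-preparation/create_training_data.py | has_consecutive_synthetic_readings
-- ===== SOURCE A (Python) =====
-- def has_consecutive_synthetic_readings(sequence, max_consecutive=6):
--     """
--     Check if a sequence has too many consecutive synthetic readings (-999).
--     Returns True if max_consecutive or more -999 values appear in a row.
--     """
--     consecutive_count = 0
--
--     for value in sequence:
--         if value == -999:
--             consecutive_count += 1
--             if consecutive_count >= max_consecutive:
--                 return True
--         else:
--             consecutive_count = 0
--
--     return False
-- ===== SOURCE B (Python) =====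
-- def has_consecutive_synthetic_readings(sequence, max_consecutive=6):
--     """
--     Check if a sequence has too many consecutive synthetic readings (-999).
--     Returns True if max_consecutive or more -999 values appear in a row.
--
--     Brute-force window check: a run of length >= k := max(max_consecutive, 1)
--     exists iff some window of k consecutive elements is entirely -999.
--     """
--     seq = list(sequence)
--     k = max(max_consecutive, 1)
--     return any(all(seq[j] == -999 for j in range(i, i + k))
--                for i in range(len(seq) - k + 1))
-- ===== Notes on version B (the rewrite author's own statement) =====
-- stated objective: alternative
-- what changed: Replaced A's single-pass running counter with reset by a brute-force sliding-window check: test every window of length max(max_consecutive,1) for being entirely -999 (a run of length >= k exists iff some length-k window is all -999).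
import Mathlib
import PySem

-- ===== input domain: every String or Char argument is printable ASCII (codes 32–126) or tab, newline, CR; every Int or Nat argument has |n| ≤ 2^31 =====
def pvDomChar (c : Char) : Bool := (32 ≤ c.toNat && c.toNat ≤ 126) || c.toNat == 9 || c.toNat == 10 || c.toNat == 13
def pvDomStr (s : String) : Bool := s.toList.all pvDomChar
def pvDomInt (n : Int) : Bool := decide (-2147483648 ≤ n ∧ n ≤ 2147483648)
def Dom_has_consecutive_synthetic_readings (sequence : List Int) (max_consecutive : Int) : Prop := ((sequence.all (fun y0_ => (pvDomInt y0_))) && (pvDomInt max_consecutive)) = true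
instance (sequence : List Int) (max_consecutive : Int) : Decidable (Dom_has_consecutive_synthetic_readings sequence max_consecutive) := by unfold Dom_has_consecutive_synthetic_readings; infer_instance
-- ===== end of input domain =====

-- B replaces A's running-counter pass by a brute-force sliding-window check; same result, alternative algorithm (not faster).

-- ===== PORT A =====
-- the for-loop of A: state = consecutive_count; early return via the Bool result
def pvGoA (max_consecutive : Int) : List Int → Int → Bool
  | [], _ => false
  | v :: rest, cnt =>
    if v == -999 then
      if cnt + 1 ≥ max_consecutive then true
      else pvGoA max_consecutive rest (cnt + 1)
    else pvGoA max_consecutive rest 0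

def has_consecutive_synthetic_readings (sequence : List Int) (max_consecutive : Int) : Bool :=
  pvGoA max_consecutive sequence 0

-- ===== PORT B =====
-- range(len(seq) - k + 1) has max(len-k+1, 0) elements; since k ≥ 1 this is the Nat subtraction len+1-k.
-- range(i, i + k) is List.range' i k; seq[j] for the in-range index 0 ≤ j < len is exactly seq.getD j 0.
def has_consecutive_synthetic_readings_alt (sequence : List Int) (max_consecutive : Int) : Bool :=
  let k := (max max_consecutive 1).toNat
  (List.range (sequence.length + 1 - k)).any
    (fun i => (List.range' i k).all (fun j => sequence.getD j 0 == -999))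

-- ===== PRECONDITION & SPEC =====
def Spec_has_consecutive_synthetic_readings (sequence : List Int) (max_consecutive : Int) (out : Bool) : Prop := out = has_consecutive_synthetic_readings_alt sequence max_consecutive
instance (sequence : List Int) (max_consecutive : Int) (out : Bool) : Decidable (Spec_has_consecutive_synthetic_readings sequence max_consecutive out) := by unfold Spec_has_consecutive_synthetic_readings; infer_instance

-- ===== CLAIM (what is proved, stated in full; the proofs are below) =====
def Claim_equal_has_consecutive_synthetic_readings : Prop := ∀ (sequence : List Int) (max_consecutive : Int), Dom_has_consecutive_synthetic_readings sequence max_consecutive → Spec_has_consecutive_synthetic_readings sequence max_consecutive (has_consecutive_synthetic_readings sequence max_consecutive)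

-- ===== LEMMAS AND PROOFS =====

-- abbreviation of B's window scan, for the lemmas
def pvWinAny (k : Nat) (l : List Int) : Bool :=
  (List.range (l.length + 1 - k)).any
    (fun i => ((l.drop i).take k).all (fun v => v == -999))

theorem any_congr_mem {α : Type} (l : List α) (p q : α → Bool) (h : ∀ a ∈ l, p a = q a) :
    l.any p = l.any q := by
  induction l with
  | nil => rfl
  | cons a l ih =>
    simp only [List.any_cons, h a (by simp), ih (fun b hb => h b (by simp [hb]))]

-- the index-probed window of B equals the drop/take window used by the lemmas below
theorem window_map (l : List Int) (i k : Nat) (h : i + k ≤ l.length) :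
    (l.drop i).take k = (List.range' i k).map (fun j => l.getD j 0) := by
  apply List.ext_getElem
  · simp; omega
  · intro n h1 h2
    simp only [List.getElem_take, List.getElem_drop, List.getElem_map, List.getElem_range']
    rw [List.getD_eq_getElem l 0 (by simp at h1 h2 ⊢; omega)]
    congr 1
    omega

theorem alt_eq_winAny (sequence : List Int) (m : Int) :
    has_consecutive_synthetic_readings_alt sequence m = pvWinAny ((max m 1).toNat) sequence := by
  unfold has_consecutive_synthetic_readings_alt pvWinAny
  refine any_congr_mem _ _ _ (fun i hi => ?_)
  rw [List.mem_range] at hi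
  rw [window_map sequence i _ (by omega), List.all_map]
  rfl

theorem winAny_short (k : Nat) (l : List Int) (h : l.length < k) : pvWinAny k l = false := by
  unfold pvWinAny
  have : l.length + 1 - k = 0 := by omega
  simp [this]

theorem winAny_cons (k : Nat) (v : Int) (rest : List Int) :
    pvWinAny k (v :: rest) =
      ((if k ≤ rest.length + 1 then ((v :: rest).take k).all (fun v => v == -999) else false)
        || pvWinAny k rest) := by
  by_cases h : k ≤ rest.length + 1
  · have hlen : (v :: rest).length + 1 - k = (rest.length + 1 - k) + 1 := by
      simp only [List.length_cons]; omega
    unfold pvWinAny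
    rw [hlen, List.range_succ_eq_map]
    simp [List.any_map, Function.comp_def, h]
  · have h1 : (v :: rest).length + 1 - k = 0 := by simp only [List.length_cons]; omega
    have h2 : rest.length + 1 - k = 0 := by omega
    unfold pvWinAny
    rw [h1, h2]
    simp [h]

-- the all-(-999) window at position 0 of replicate (c) ++ rest, when c ≥ k
theorem winAny_replicate_prefix (k c : Nat) (hk : k ≤ c) (rest : List Int) :
    pvWinAny k (List.replicate c (-999) ++ rest) = true := by
  unfold pvWinAny
  rw [List.any_eq_true]
  refine ⟨0, ?_, ?_⟩
  · rw [List.mem_range]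
    simp only [List.length_append, List.length_replicate]
    omega
  · rw [List.drop_zero, List.take_append, List.take_replicate, Nat.min_eq_left hk,
      Nat.sub_eq_zero_of_le (by simpa using hk), List.take_zero, List.append_nil]
    simp

-- dropping a too-short all-(-999) prefix followed by a non-(-999) value
theorem winAny_drop_block (k : Nat) (v : Int) (hv : v ≠ -999) (rest : List Int) :
    ∀ c : Nat, c < k →
      pvWinAny k (List.replicate c (-999) ++ v :: rest) = pvWinAny k rest := by
  intro c
  induction c with
  | zero =>
    intro hk
    rw [List.replicate_zero, List.nil_append, winAny_cons]
    have : ((v :: rest).take k).all (fun v => v == -999) = false := by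
      obtain ⟨k', rfl⟩ : ∃ k', k = k' + 1 := ⟨k - 1, by omega⟩
      rw [List.take_succ_cons, List.all_cons]
      simp [hv]
    simp [this]
  | succ c ih =>
    intro hk
    rw [List.replicate_succ, List.cons_append, winAny_cons, ih (by omega)]
    have hall : ((-999 :: (List.replicate c (-999) ++ v :: rest)).take k).all (fun v => v == -999) = false := by
      rw [List.all_eq_false]
      refine ⟨v, ?_, by simp [hv]⟩
      obtain ⟨k', rfl⟩ : ∃ k', k = k' + 1 := ⟨k - 1, by omega⟩
      rw [List.take_succ_cons, List.take_append, List.take_replicate,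
        Nat.min_eq_right (by omega)]
      have : k' - (List.replicate c (-999 : Int)).length = (k' - c - 1) + 1 := by
        simp only [List.length_replicate]; omega
      rw [this, List.take_succ_cons]
      simp
    simp [hall]

-- A's loop condition, against k = (max m 1).toNat, for a nonnegative counter
theorem cond_iff (m : Int) (c : Nat) :
    (((c : Int) + 1 ≥ m) ↔ (c + 1 ≥ (max m 1).toNat)) := by
  have h1 : ((max m 1).toNat : Int) = max m 1 := Int.toNat_of_nonneg (by omega)
  omega

-- main loop invariant: counter c of A ↔ a pending block of c copies of -999 for B
theorem goA_eq_winAny (m : Int) (l : List Int) :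
    ∀ c : Nat, c < (max m 1).toNat →
      pvGoA m l (c : Int) = pvWinAny ((max m 1).toNat) (List.replicate c (-999) ++ l) := by
  induction l with
  | nil =>
    intro c hc
    rw [List.append_nil, pvGoA, winAny_short _ _ (by simpa using hc)]
  | cons v rest ih =>
    intro c hc
    by_cases hv : v = -999
    · subst hv
      rw [pvGoA]
      simp only [beq_self_eq_true, if_true]
      by_cases hge : c + 1 ≥ (max m 1).toNat
      · rw [if_pos (by exact_mod_cast (cond_iff m c).mpr hge)]
        have hlist : List.replicate c (-999 : Int) ++ -999 :: rest
            = List.replicate (c + 1) (-999) ++ rest := by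
          rw [List.replicate_succ', List.append_assoc]; rfl
        rw [hlist, winAny_replicate_prefix _ _ hge]
      · rw [if_neg (by exact_mod_cast fun h => hge ((cond_iff m c).mp h))]
        have hlist : List.replicate c (-999 : Int) ++ -999 :: rest
            = List.replicate (c + 1) (-999) ++ rest := by
          rw [List.replicate_succ', List.append_assoc]; rfl
        rw [hlist]
        have := ih (c + 1) (by omega)
        rw [← this]
        norm_cast
    · rw [pvGoA]
      simp only [beq_iff_eq, hv, if_false]
      rw [winAny_drop_block _ v hv rest c hc]
      have h0 : (0 : Nat) < (max m 1).toNat := by omega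
      have := ih 0 h0
      simpa using this

-- ===== VERDICT (by name: the statement is the Claim_ definition above) =====
theorem has_consecutive_synthetic_readings_spec : Claim_equal_has_consecutive_synthetic_readings := by
  intro sequence m _
  unfold Spec_has_consecutive_synthetic_readings has_consecutive_synthetic_readings
  rw [alt_eq_winAny]
  have h0 : (0 : Nat) < (max m 1).toNat := by omega
  have := goA_eq_winAny m sequence 0 h0
  simpa using this
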